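-- pv_equiv track=rewrite | github.com/Xinke-Lee/25fall-B | 题/oj/M02786.py | pell
-- ===== SOURCE A (Python) =====
-- def pell(k):
--     if k == 1:
--         return 1
--     elif k == 2:
--         return 2
--
--     a1, a2 = 1, 2
--     for i in range(3, k + 1):
--         a1, a2 = a2, (2 * a2 + a1) % 32767
--
--     return a2
-- ===== SOURCE B (Python) =====
-- MOD = 32767
--
-- def _mat_mul(X, Y):
--     a, b, c, d = X
--     e, f, g, h = Y
--     return ((a * e + b * g) % MOD, (a * f + b * h) % MOD,
--             (c * e + d * g) % MOD, (c * f + d * h) % MOD)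
--
-- def _mat_pow(M, e):
--     R = (1, 0, 0, 1)
--     while e > 0:
--         if e % 2 == 1:
--             R = _mat_mul(R, M)
--         M = _mat_mul(M, M)
--         e //= 2
--     return R
--
-- def pell(k):
--     if k == 1:
--         return 1
--     # (a1, a2) -> (a2, 2*a2 + a1) is right-multiplication by [[0,1],[1,2]]
--     a, b, c, d = _mat_pow((0, 1, 1, 2), k - 2)
--     return (b + 2 * d) % MOD
-- ===== Notes on version B (the rewrite author's own statement) =====
-- stated objective: faster
-- what changed: replaces the linear recurrence loop by 2x2 matrix exponentiation under the same modulus (square-and-multiply), computing the k-th term in O(log k) multiplications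
import Mathlib
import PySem

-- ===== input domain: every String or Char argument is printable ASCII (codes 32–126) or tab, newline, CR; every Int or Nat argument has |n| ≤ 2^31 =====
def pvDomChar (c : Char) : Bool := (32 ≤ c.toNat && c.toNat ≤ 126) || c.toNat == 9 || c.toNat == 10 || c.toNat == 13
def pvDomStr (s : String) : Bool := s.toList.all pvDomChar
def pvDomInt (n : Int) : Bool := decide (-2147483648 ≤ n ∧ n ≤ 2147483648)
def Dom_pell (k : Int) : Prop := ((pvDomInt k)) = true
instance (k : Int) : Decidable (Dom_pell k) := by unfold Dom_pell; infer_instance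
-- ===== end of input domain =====

-- B replaces A's O(k) recurrence loop by 2x2 matrix exponentiation under the same modulus (O(log k)).

-- ===== PORT A =====
def pell (k : Int) : Int :=
  if k = 1 then 1
  else if k = 2 then 2
  else
    -- a1, a2 = 1, 2 ; for i in range(3, k+1): a1, a2 = a2, (2*a2 + a1) % 32767
    let s := (PySem.List.pyRange 3 (k + 1) 1).foldl
      (fun (p : Int × Int) _ => (p.2, PySem.Int.mod (2 * p.2 + p.1) 32767)) (1, 2)
    s.2

-- ===== PORT B =====
-- _mat_mul: 2x2 matrix product with every entry reduced mod 32767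
def matMul (X Y : Int × Int × Int × Int) : Int × Int × Int × Int :=
  (PySem.Int.mod (X.1 * Y.1 + X.2.1 * Y.2.2.1) 32767,
   PySem.Int.mod (X.1 * Y.2.1 + X.2.1 * Y.2.2.2) 32767,
   PySem.Int.mod (X.2.2.1 * Y.1 + X.2.2.2 * Y.2.2.1) 32767,
   PySem.Int.mod (X.2.2.1 * Y.2.1 + X.2.2.2 * Y.2.2.2) 32767)

-- _mat_pow's while-loop: square-and-multiply
def matPowLoop (R M : Int × Int × Int × Int) (e : Int) : Int × Int × Int × Int :=
  if _h : 0 < e then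
    matPowLoop (if PySem.Int.mod e 2 = 1 then matMul R M else R) (matMul M M)
      (PySem.Int.floordiv e 2)
  else R
termination_by e.toNat
decreasing_by
  rw [PySem.Int.floordiv_eq_ediv_of_pos (by norm_num)]
  omega

def pell_alt (k : Int) : Int :=
  if k = 1 then 1
  else
    let m := matPowLoop (1, 0, 0, 1) (0, 1, 1, 2) (k - 2)
    PySem.Int.mod (m.2.1 + 2 * m.2.2.2) 32767

-- ===== PRECONDITION & SPEC =====
def Spec_pell (k : Int) (out : Int) : Prop := out = pell_alt k
instance (k : Int) (out : Int) : Decidable (Spec_pell k out) := by unfold Spec_pell; infer_instance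

-- ===== CLAIM (what is proved, stated in full; the proofs are below) =====
def Claim_equal_pell : Prop := ∀ (k : Int), Dom_pell k → Spec_pell k (pell k)

-- ===== LEMMAS AND PROOFS =====

-- cast a 2x2 Int tuple into a matrix over ZMod 32767
def castMat (X : Int × Int × Int × Int) : Matrix (Fin 2) (Fin 2) (ZMod 32767) :=
  !![(X.1 : ZMod 32767), (X.2.1 : ZMod 32767); (X.2.2.1 : ZMod 32767), (X.2.2.2 : ZMod 32767)]

-- A's loop body
def stepA (p : Int × Int) : Int × Int := (p.2, PySem.Int.mod (2 * p.2 + p.1) 32767)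

lemma mod_cast_z (a : Int) :
    ((PySem.Int.mod a 32767 : Int) : ZMod 32767) = (a : ZMod 32767) := by
  rw [PySem.Int.mod_eq_emod_of_pos (by norm_num)]
  exact_mod_cast ZMod.intCast_mod a 32767

lemma castMat_mul (X Y : Int × Int × Int × Int) :
    castMat (matMul X Y) = castMat X * castMat Y := by
  ext i j
  fin_cases i <;> fin_cases j <;>
    · simp only [castMat, matMul, Matrix.mul_apply, Fin.sum_univ_two]
      simp only [mod_cast_z]
      push_cast
      simp [Matrix.cons_val_zero, Matrix.cons_val_one]

lemma matPowLoop_cast_aux (n : Nat) : ∀ (e : Int), e.toNat ≤ n → ∀ R M,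
    castMat (matPowLoop R M e) = castMat R * (castMat M) ^ e.toNat := by
  induction n with
  | zero =>
    intro e he R M
    rw [matPowLoop]
    have hp : ¬ 0 < e := by omega
    have h0 : e.toNat = 0 := by omega
    simp [hp, h0]
  | succ n ih =>
    intro e he R M
    rw [matPowLoop]
    by_cases hp : 0 < e
    · simp only [hp, dite_true]
      have hdiv : PySem.Int.floordiv e 2 = e / 2 :=
        PySem.Int.floordiv_eq_ediv_of_pos (by norm_num)
      have hmod : PySem.Int.mod e 2 = e % 2 :=
        PySem.Int.mod_eq_emod_of_pos (by norm_num)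
      rw [hdiv, ih (e / 2) (by omega)]
      have h2 : (e / 2).toNat = e.toNat / 2 := by omega
      rw [castMat_mul, h2]
      by_cases ho : PySem.Int.mod e 2 = 1
      · simp only [ho, if_true]
        rw [castMat_mul]
        have ho' : e % 2 = 1 := by rw [← hmod]; exact ho
        have ht : e.toNat = 2 * (e.toNat / 2) + 1 := by omega
        conv_rhs => rw [ht]
        rw [pow_succ, pow_mul, sq, mul_assoc]
        congr 1
        exact (((Commute.refl (castMat M)).mul_right (Commute.refl (castMat M))).pow_right _).eq
      · simp only [ho, if_false]
        have ho' : ¬ e % 2 = 1 := by rw [← hmod]; exact ho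
        have ht : e.toNat = 2 * (e.toNat / 2) := by omega
        conv_rhs => rw [ht]
        rw [pow_mul, sq]
    · simp only [hp, dite_false]
      have h0 : e.toNat = 0 := by omega
      simp [h0]

lemma matPowLoop_cast (e : Int) (R M : Int × Int × Int × Int) :
    castMat (matPowLoop R M e) = castMat R * (castMat M) ^ e.toNat :=
  matPowLoop_cast_aux e.toNat e le_rfl R M

-- the recurrence matrix
def Mz : Matrix (Fin 2) (Fin 2) (ZMod 32767) := !![0, 1; 1, 2]

lemma iterate_cast (n : Nat) :
    ((((stepA)^[n] (1, 2)).1 : ZMod 32767), (((stepA)^[n] (1, 2)).2 : ZMod 32767))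
      = ((Mz ^ n) 0 0 + 2 * (Mz ^ n) 1 0, (Mz ^ n) 0 1 + 2 * (Mz ^ n) 1 1) := by
  induction n with
  | zero => simp [Mz]
  | succ n ih =>
    rw [Function.iterate_succ_apply']
    have h1 := congrArg Prod.fst ih
    have h2 := congrArg Prod.snd ih
    simp only at h1 h2
    simp only [stepA, mod_cast_z, pow_succ, Prod.mk.injEq]
    refine ⟨?_, ?_⟩
    · simp [Matrix.mul_apply, Fin.sum_univ_two, Mz, h2]
    · push_cast
      simp only [Matrix.mul_apply, Fin.sum_univ_two, Mz, h1, h2]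
      simp [Matrix.cons_val_zero, Matrix.cons_val_one]
      ring

lemma iterate_snd_bounds (n : Nat) :
    0 ≤ ((stepA)^[n] (1, 2)).2 ∧ ((stepA)^[n] (1, 2)).2 < 32767 := by
  cases n with
  | zero => simp
  | succ n =>
    rw [Function.iterate_succ_apply']
    simp only [stepA, PySem.Int.mod_eq_emod_of_pos (b := 32767) (by norm_num)]
    exact ⟨Int.emod_nonneg _ (by norm_num), Int.emod_lt_of_pos _ (by norm_num)⟩

lemma foldl_const {α β : Type} (f : β → β) (l : List α) (s : β) :
    l.foldl (fun p _ => f p) s = f^[l.length] s := by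
  induction l generalizing s with
  | nil => rfl
  | cons x t ih =>
    simp only [List.foldl_cons, List.length_cons, ih, Function.iterate_succ_apply]

lemma pell_char (k : Int) (hk : k ≠ 1) :
    pell k = ((stepA)^[(k - 2).toNat] (1, 2)).2 := by
  unfold pell
  simp only [hk, if_false]
  by_cases h2 : k = 2
  · simp [h2]
  · simp only [h2, if_false]
    have := foldl_const stepA (PySem.List.pyRange 3 (k + 1) 1) (1, 2)
    simp only [stepA] at this
    rw [this, PySem.List.length_pyRange_one]
    have harith : k + 1 - 3 = k - 2 := by ring
    rw [harith]

lemma int_eq_of_cast_eq (x y : Int) (hx : 0 ≤ x ∧ x < 32767) (hy : 0 ≤ y ∧ y < 32767)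
    (h : (x : ZMod 32767) = (y : ZMod 32767)) : x = y := by
  have := (ZMod.intCast_eq_intCast_iff' x y 32767).mp h
  simp only [Nat.cast_ofNat] at this
  rw [Int.emod_eq_of_lt hx.1 hx.2, Int.emod_eq_of_lt hy.1 hy.2] at this
  exact this

-- ===== VERDICT (by name: the statement is the Claim_ definition above) =====
theorem pell_spec : Claim_equal_pell := by
  intro k _
  unfold Spec_pell
  by_cases hk : k = 1
  · simp [pell, pell_alt, hk]
  · rw [pell_char k hk]
    unfold pell_alt
    simp only [hk, if_false]
    set m := matPowLoop (1, 0, 0, 1) (0, 1, 1, 2) (k - 2) with hm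
    have hcast : castMat m = Mz ^ (k - 2).toNat := by
      rw [hm, matPowLoop_cast]
      have hI : castMat ((1 : Int), (0 : Int), (0 : Int), (1 : Int)) = 1 := by
        ext i j; fin_cases i <;> fin_cases j <;> simp [castMat]
      have hM : castMat ((0 : Int), (1 : Int), (1 : Int), (2 : Int)) = Mz := by
        ext i j; fin_cases i <;> fin_cases j <;> simp [castMat, Mz]
      rw [hI, hM, one_mul]
    apply int_eq_of_cast_eq
    · exact iterate_snd_bounds _
    · rw [PySem.Int.mod_eq_emod_of_pos (by norm_num)]
      exact ⟨Int.emod_nonneg _ (by norm_num), Int.emod_lt_of_pos _ (by norm_num)⟩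
    · have h2 := congrArg Prod.snd (iterate_cast (k - 2).toNat)
      simp only at h2
      rw [h2, mod_cast_z]
      push_cast
      have hb : ((m.2.1 : Int) : ZMod 32767) = (Mz ^ (k - 2).toNat) 0 1 := by
        rw [← hcast]; simp [castMat]
      have hd : ((m.2.2.2 : Int) : ZMod 32767) = (Mz ^ (k - 2).toNat) 1 1 := by
        rw [← hcast]; simp [castMat]
      rw [hb, hd]
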